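-- pv_equiv track=rewrite | github.com/amperity/chuck-data | chuck_data/commands/setup_stitch.py | normalize_redshift_type
-- ===== SOURCE A (Python) =====
-- def normalize_redshift_type(redshift_type: str) -> str:
--     """Normalize Redshift types to Spark types."""
--     type_lower = redshift_type.lower()
--
--     if any(t in type_lower for t in ["varchar", "char", "text", "character"]):
--         return "string"
--
--     if any(
--         t in type_lower
--         for t in ["int", "integer", "smallint", "bigint", "int2", "int4", "int8"]
--     ):
--         return "long"
--
--     if any(t in type_lower for t in ["decimal", "numeric"]):
--         return "decimal"
--
--     if any(t in type_lower for t in ["float", "double", "real", "float4", "float8"]):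
--         return "double"
--
--     if "bool" in type_lower:
--         return "boolean"
--
--     if "date" in type_lower:
--         return "date"
--     if "timestamp" in type_lower:
--         return "timestamp"
--
--     return "string"
-- ===== SOURCE B (Python) =====
-- # B: single left-to-right scan of the lowercased string collecting one hit flag per
-- # Spark type (using the minimal keyword per group), then a priority pick over the flags.
-- _GROUPS = [
--     (("char", "text"), "string"),
--     (("int",), "long"),
--     (("decimal", "numeric"), "decimal"),
--     (("float", "double", "real"), "double"),
--     (("bool",), "boolean"),
--     (("date",), "date"),
--     (("timestamp",), "timestamp"),
-- ]
--
--
-- def normalize_redshift_type(redshift_type: str) -> str: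
--     s = redshift_type.lower()
--     hits = [False] * len(_GROUPS)
--     for i in range(len(s)):
--         for j, (kws, _) in enumerate(_GROUPS):
--             if s.startswith(kws, i):
--                 hits[j] = True
--     for hit, (_, name) in zip(hits, _GROUPS):
--         if hit:
--             return name
--     return "string"
-- ===== Notes on version B (the rewrite author's own statement) =====
-- stated objective: alternative
-- what changed: Replaces A's cascade of per-keyword substring-containment tests by a single left-to-right scan over the lowercased string that sets one hit flag per Spark type (using the minimal keyword of each redundant group), followed by a priority pick over the flags.
import Mathlib
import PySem

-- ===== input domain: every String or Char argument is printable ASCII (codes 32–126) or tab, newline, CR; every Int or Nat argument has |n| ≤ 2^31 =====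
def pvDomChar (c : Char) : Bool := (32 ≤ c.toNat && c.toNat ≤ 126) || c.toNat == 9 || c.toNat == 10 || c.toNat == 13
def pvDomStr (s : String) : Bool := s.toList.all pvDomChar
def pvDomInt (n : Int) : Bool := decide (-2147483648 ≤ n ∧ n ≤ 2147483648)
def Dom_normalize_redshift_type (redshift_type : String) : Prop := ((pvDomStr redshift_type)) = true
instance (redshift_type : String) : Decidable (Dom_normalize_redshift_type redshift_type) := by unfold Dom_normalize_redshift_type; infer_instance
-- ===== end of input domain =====

-- B replaces A's cascade of substring-containment tests by a single left-to-right scan of the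
-- lowercased string collecting one hit flag per Spark type, then a priority pick (alternative decomposition).


-- ===== PORT A =====
def normalize_redshift_type (redshift_type : String) : String :=
  let type_lower := PySem.Str.lower redshift_type
  if (["varchar", "char", "text", "character"].any (fun t => PySem.Str.isIn t type_lower)) then
    "string"
  else if (["int", "integer", "smallint", "bigint", "int2", "int4", "int8"].any
      (fun t => PySem.Str.isIn t type_lower)) then
    "long"
  else if (["decimal", "numeric"].any (fun t => PySem.Str.isIn t type_lower)) then
    "decimal"
  else if (["float", "double", "real", "float4", "float8"].any
      (fun t => PySem.Str.isIn t type_lower)) then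
    "double"
  else if PySem.Str.isIn "bool" type_lower then
    "boolean"
  else if PySem.Str.isIn "date" type_lower then
    "date"
  else if PySem.Str.isIn "timestamp" type_lower then
    "timestamp"
  else
    "string"

-- ===== PORT B =====
-- s.startswith(kw, i) with 0 ≤ i : exact as prefix test on s.drop i
def pvStartsAt (s : List Char) (i : Nat) (kw : String) : Bool :=
  PySem.Chars.startswith (s.drop i) kw.toList

-- one step of the scan: for each of the 7 flags, or-in "some group keyword starts at i"
def pvScanStep (s : List Char) (h : Bool × Bool × Bool × Bool × Bool × Bool × Bool) (i : Nat) :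
    Bool × Bool × Bool × Bool × Bool × Bool × Bool :=
  (h.1 || (pvStartsAt s i "char" || pvStartsAt s i "text"),
   h.2.1 || pvStartsAt s i "int",
   h.2.2.1 || (pvStartsAt s i "decimal" || pvStartsAt s i "numeric"),
   h.2.2.2.1 || (pvStartsAt s i "float" || (pvStartsAt s i "double" || pvStartsAt s i "real")),
   h.2.2.2.2.1 || pvStartsAt s i "bool",
   h.2.2.2.2.2.1 || pvStartsAt s i "date",
   h.2.2.2.2.2.2 || pvStartsAt s i "timestamp")

def normalize_redshift_type_alt (redshift_type : String) : String :=
  let s := (PySem.Str.lower redshift_type).toList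
  let h := (List.range s.length).foldl (pvScanStep s) (false, false, false, false, false, false, false)
  if h.1 then "string"
  else if h.2.1 then "long"
  else if h.2.2.1 then "decimal"
  else if h.2.2.2.1 then "double"
  else if h.2.2.2.2.1 then "boolean"
  else if h.2.2.2.2.2.1 then "date"
  else if h.2.2.2.2.2.2 then "timestamp"
  else "string"

-- ===== PRECONDITION & SPEC =====
def Spec_normalize_redshift_type (redshift_type : String) (out : String) : Prop := out = normalize_redshift_type_alt redshift_type
instance (redshift_type : String) (out : String) : Decidable (Spec_normalize_redshift_type redshift_type out) := by unfold Spec_normalize_redshift_type; infer_instance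

-- ===== CLAIM (what is proved, stated in full; the proofs are below) =====
def Claim_equal_normalize_redshift_type : Prop := ∀ (redshift_type : String), Dom_normalize_redshift_type redshift_type → Spec_normalize_redshift_type redshift_type (normalize_redshift_type redshift_type)

-- ===== LEMMAS AND PROOFS =====

-- the scan computes, per flag, "some position where a group keyword starts"
theorem pv_scan_eq (s : List Char) (l : List Nat) (h : Bool × Bool × Bool × Bool × Bool × Bool × Bool) :
    l.foldl (pvScanStep s) h =
      (h.1 || l.any (fun i => pvStartsAt s i "char" || pvStartsAt s i "text"),
       h.2.1 || l.any (fun i => pvStartsAt s i "int"),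
       h.2.2.1 || l.any (fun i => pvStartsAt s i "decimal" || pvStartsAt s i "numeric"),
       h.2.2.2.1 || l.any (fun i => pvStartsAt s i "float" || (pvStartsAt s i "double" || pvStartsAt s i "real")),
       h.2.2.2.2.1 || l.any (fun i => pvStartsAt s i "bool"),
       h.2.2.2.2.2.1 || l.any (fun i => pvStartsAt s i "date"),
       h.2.2.2.2.2.2 || l.any (fun i => pvStartsAt s i "timestamp")) := by
  induction l generalizing h with
  | nil => simp
  | cons a l ih => simp [List.foldl_cons, pvScanStep, ih, Bool.or_assoc]

-- "kw starts at some scanned position" = "kw in s" (for nonempty kw)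
theorem pv_any_range (kw : String) (hk : kw.toList ≠ []) (s : List Char) :
    (List.range s.length).any (fun i => pvStartsAt s i kw) = PySem.Chars.isIn kw.toList s := by
  rw [Bool.eq_iff_iff]
  simp only [List.any_eq_true, List.mem_range, pvStartsAt, PySem.Chars.startswith_iff,
    ← PySem.Chars.exists_prefix_drop_iff_isIn]
  constructor
  · rintro ⟨i, _, hp⟩; exact ⟨i, hp⟩
  · rintro ⟨j, hp⟩
    by_cases hj : j < s.length
    · exact ⟨j, hj, hp⟩
    · exfalso
      have hd : s.drop j = [] := List.drop_eq_nil_of_le (le_of_not_gt hj)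
      rw [hd, List.prefix_nil] at hp
      exact hk hp

theorem pv_any_or {α : Type} (l : List α) (p q : α → Bool) :
    l.any (fun x => p x || q x) = (l.any p || l.any q) := by
  induction l with
  | nil => rfl
  | cons a l ih => simp [List.any_cons, ih]; cases p a <;> cases q a <;> simp

-- a containment test for a keyword that itself contains a shorter keyword is absorbed by the shorter one
theorem pv_isIn_absorb {small big : List Char} (hs : small <:+: big) (s : List Char) :
    PySem.Chars.isIn big s = (PySem.Chars.isIn big s && PySem.Chars.isIn small s) := by
  cases h : PySem.Chars.isIn big s
  · rfl
  · have hb : big <:+: s := (PySem.Chars.isIn_iff_infix big s).mp h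
    have : PySem.Chars.isIn small s = true := (PySem.Chars.isIn_iff_infix small s).mpr (hs.trans hb)
    simp [this]

theorem pv_b1 (v c t k : Bool) : (v && c || (c || (t || (k && c || false)))) = (c || t) := by cases c <;> simp
theorem pv_b2 (i a b c d e f : Bool) :
    (i || (a && i || (b && i || (c && i || (d && i || (e && i || (f && i || false))))))) = i := by cases i <;> simp
theorem pv_b3 (d n : Bool) : (d || (n || false)) = (d || n) := by simp
theorem pv_b4 (f db re x y : Bool) :
    (f || (db || (re || (x && f || (y && f || false))))) = (f || (db || re)) := by cases f <;> simp

-- ===== VERDICT (by name: the statement is the Claim_ definition above) =====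
theorem normalize_redshift_type_spec : Claim_equal_normalize_redshift_type := by
  intro r _
  unfold Spec_normalize_redshift_type normalize_redshift_type normalize_redshift_type_alt
  simp only [List.any_cons, List.any_nil, PySem.Str.isIn_eq, pv_scan_eq, pv_any_or, Bool.false_or]
  rw [pv_any_range "char" (by decide), pv_any_range "text" (by decide),
    pv_any_range "int" (by decide), pv_any_range "decimal" (by decide),
    pv_any_range "numeric" (by decide), pv_any_range "float" (by decide),
    pv_any_range "double" (by decide), pv_any_range "real" (by decide),
    pv_any_range "bool" (by decide), pv_any_range "date" (by decide),
    pv_any_range "timestamp" (by decide)]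
  rw [pv_isIn_absorb (small := "char".toList) (big := "varchar".toList) (by decide),
    pv_isIn_absorb (small := "char".toList) (big := "character".toList) (by decide),
    pv_isIn_absorb (small := "int".toList) (big := "integer".toList) (by decide),
    pv_isIn_absorb (small := "int".toList) (big := "smallint".toList) (by decide),
    pv_isIn_absorb (small := "int".toList) (big := "bigint".toList) (by decide),
    pv_isIn_absorb (small := "int".toList) (big := "int2".toList) (by decide),
    pv_isIn_absorb (small := "int".toList) (big := "int4".toList) (by decide),
    pv_isIn_absorb (small := "int".toList) (big := "int8".toList) (by decide),
    pv_isIn_absorb (small := "float".toList) (big := "float4".toList) (by decide),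
    pv_isIn_absorb (small := "float".toList) (big := "float8".toList) (by decide)]
  rw [pv_b1, pv_b2, pv_b3, pv_b4]
  rfl
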